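-- pv_equiv track=rewrite | github.com/DiogoProPrayer/SuperTTS | SuperTTS.py | count_subject_days
-- ===== SOURCE A (Python) =====
-- def count_subject_days(schedule):
--     """
--     Counts the number of different days a subject appears in a given schedule.
--     """
--     subject_days = {}
--
--     for day_index, day_schedule in enumerate(schedule):
--         for class_info in day_schedule:
--             subject = class_info[0]
--             if subject not in subject_days:
--                 subject_days[subject] = set()
--             subject_days[subject].add(day_index)
--
--     # Calculate the total number of days for all subjects
--     total_days = sum(len(days) for days in subject_days.values())
--     return total_days
-- ===== SOURCE B (Python) =====
-- def count_subject_days(schedule):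
--     return sum(len({class_info[0] for class_info in day_schedule})
--                for day_schedule in schedule)
-- ===== Notes on version B (the rewrite author's own statement) =====
-- stated objective: simpler
-- what changed: B exploits that (subject, day) pairs from different days can never collide: it deduplicates subjects locally within each day and sums the per-day distinct-subject counts, keeping no cross-day state at all, whereas A maintains a global dict of per-subject day-sets and aggregates it in a second pass.
import Mathlib
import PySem

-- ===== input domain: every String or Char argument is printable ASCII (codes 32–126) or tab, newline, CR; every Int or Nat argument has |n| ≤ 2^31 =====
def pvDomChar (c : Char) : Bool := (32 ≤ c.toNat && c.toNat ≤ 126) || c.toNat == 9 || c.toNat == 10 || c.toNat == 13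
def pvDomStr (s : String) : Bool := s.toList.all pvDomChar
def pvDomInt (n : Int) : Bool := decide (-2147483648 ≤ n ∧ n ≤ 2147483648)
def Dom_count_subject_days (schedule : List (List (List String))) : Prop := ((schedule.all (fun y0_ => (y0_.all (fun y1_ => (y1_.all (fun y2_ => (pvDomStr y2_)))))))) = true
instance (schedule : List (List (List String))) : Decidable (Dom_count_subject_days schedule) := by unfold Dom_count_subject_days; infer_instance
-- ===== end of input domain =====

-- B deduplicates subjects locally within each day and sums the per-day counts (days can never collide on (subject, day)), keeping no cross-day state, instead of A's global dict of per-subject day-sets plus a summation pass.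

-- ===== PORT A =====
-- one inner-loop body of A: subject = class_info[0]; if subject not in subject_days: subject_days[subject] = set(); subject_days[subject].add(day_index)
def aStep (day : Int) (d : PySem.Dict String (PySem.Set Int)) (ci : List String) : PySem.Dict String (PySem.Set Int) :=
  let subject := PySem.List.pyGetD ci 0 ""
  let d' := if d.contains subject then d else d.insert subject ([] : PySem.Set Int)
  d'.modify subject ([] : PySem.Set Int) (fun st => PySem.Set.add st day)

def count_subject_days (schedule : List (List (List String))) : Int :=
  let subject_days := (PySem.List.enumerate schedule 0).foldl
    (fun d p => p.2.foldl (aStep p.1) d) PySem.Dict.empty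
  subject_days.values.foldl (fun acc days => acc + PySem.Set.len days) 0

-- ===== PORT B =====
-- sum(len({class_info[0] for class_info in day_schedule}) for day_schedule in schedule)
def count_subject_days_alt (schedule : List (List (List String))) : Int :=
  schedule.foldl
    (fun acc ds =>
      acc + PySem.Set.len
        (ds.foldl (fun st ci => PySem.Set.add st (PySem.List.pyGetD ci 0 "")) (PySem.Set.empty : PySem.Set String)))
    0

-- ===== PRECONDITION & SPEC =====
-- Pre_ excludes schedules containing an empty class_info list: there class_info[0] raises IndexError (in A and in B alike).
def Pre_count_subject_days (schedule : List (List (List String))) : Prop :=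
  ∀ ds ∈ schedule, ∀ ci ∈ ds, ci ≠ []
instance (schedule : List (List (List String))) : Decidable (Pre_count_subject_days schedule) := by unfold Pre_count_subject_days; infer_instance

def pvWitness_count_subject_days : List (List (List String)) :=
  [[["math", "9am"]], [["math"], ["eng"]], []]

def Spec_count_subject_days (schedule : List (List (List String))) (out : Int) : Prop := out = count_subject_days_alt schedule
instance (schedule : List (List (List String))) (out : Int) : Decidable (Spec_count_subject_days schedule out) := by unfold Spec_count_subject_days; infer_instance

-- ===== CLAIM (what is proved, stated in full; the proofs are below) =====
def Claim_equal_count_subject_days : Prop := ∀ (schedule : List (List (List String))), Dom_count_subject_days schedule → Pre_count_subject_days schedule → Spec_count_subject_days schedule (count_subject_days schedule)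

-- ===== LEMMAS AND PROOFS =====

-- Invariant tying A's dict state to a flat set of (subject, day) pairs: unique keys, membership correspondence, and size bookkeeping.
def SInv (d : PySem.Dict String (PySem.Set Int)) (seen : PySem.Set (String × Int)) : Prop :=
  d.keys.Nodup ∧
  (∀ s day, (s, day) ∈ seen ↔ day ∈ d.getD s []) ∧
  (d.values.map List.length).sum = seen.length

lemma getD_aStep (day : Int) (d : PySem.Dict String (PySem.Set Int)) (ci : List String) (x : String) :
    (aStep day d ci).getD x [] =
      (if x = PySem.List.pyGetD ci 0 "" then PySem.Set.add (d.getD (PySem.List.pyGetD ci 0 "") []) day else d.getD x []) := by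
  unfold aStep
  set s := PySem.List.pyGetD ci 0 "" with hsdef
  by_cases hc : d.contains s
  · simp [hc, PySem.Dict.getD_modify]
  · have h0 : d.getD s ([] : PySem.Set Int) = [] := PySem.Dict.getD_of_not_contains d [] (by simpa using hc)
    simp only [hc, PySem.Dict.getD_modify]
    by_cases hx : x = s
    · simp [hx, PySem.Dict.getD_insert_self, h0]
    · simp [hx, PySem.Dict.getD_insert_of_ne]

lemma sum_map_update {α : Type} [DecidableEq α] (l : List α) (s : α) (f g : α → Nat)
    (hnd : l.Nodup) (hs : s ∈ l) (hag : ∀ x ∈ l, x ≠ s → g x = f x) :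
    (l.map g).sum + f s = (l.map f).sum + g s := by
  induction l with
  | nil => cases hs
  | cons a t ih =>
    rcases List.mem_cons.mp hs with h | hst
    · subst h
      have hsn : s ∉ t := (List.nodup_cons.mp hnd).1
      have : t.map g = t.map f := List.map_congr_left (fun x hx => hag x (List.mem_cons_of_mem _ hx) (fun h => hsn (h ▸ hx)))
      simp [this]; omega
    · have hne : a ≠ s := fun h => (List.nodup_cons.mp hnd).1 (h ▸ hst)
      have := ih (List.nodup_cons.mp hnd).2 hst (fun x hx hxs => hag x (List.mem_cons_of_mem _ hx) hxs)
      simp only [List.map_cons, List.sum_cons, hag a (List.mem_cons_self) hne]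
      omega

lemma inv_aStep (day : Int) (d : PySem.Dict String (PySem.Set Int)) (seen : PySem.Set (String × Int))
    (ci : List String) (h : SInv d seen) :
    SInv (aStep day d ci) (PySem.Set.add seen (PySem.List.pyGetD ci 0 "", day)) := by
  obtain ⟨hnd, hmem, hsum⟩ := h
  set s := PySem.List.pyGetD ci 0 "" with hsdef
  have hkeys : (aStep day d ci).keys = if d.contains s then d.keys else d.keys ++ [s] := by
    unfold aStep
    rw [← hsdef]
    by_cases hc : d.contains s
    · simp [hc, PySem.Dict.keys_modify, PySem.Dict.keys_insert_of_contains]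
    · simp only [hc, if_false, Bool.false_eq_true]
      have hcf : d.contains s = false := by simpa using hc
      simp [PySem.Dict.keys_modify, PySem.Dict.keys_insert_of_contains,
        PySem.Dict.contains_insert_self, PySem.Dict.keys_insert_of_not_contains, hcf]
  have hnd' : (aStep day d ci).keys.Nodup := by
    rw [hkeys]
    by_cases hc : d.contains s
    · simpa [hc]
    · have hns : s ∉ d.keys := by
        intro h; rw [← PySem.Dict.contains_iff_mem_keys] at h; simp [hc] at h
      simp [hc, List.nodup_append, hnd]
      exact fun a ha h => hns (h ▸ ha)
  have hmem' : ∀ x day', (x, day') ∈ PySem.Set.add seen (s, day) ↔ day' ∈ (aStep day d ci).getD x [] := by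
    intro x day'
    rw [getD_aStep, ← hsdef]
    by_cases hx : x = s
    · simp only [hx, PySem.Set.mem_add, hmem s day', Prod.mk.injEq, if_true]
      tauto
    · simp only [PySem.Set.mem_add, hmem x day', Prod.mk.injEq, hx]
      tauto
  refine ⟨hnd', hmem', ?_⟩
  have hlenA : ((aStep day d ci).getD s []).length = (d.getD s []).length + (if day ∈ d.getD s [] then 0 else 1) := by
    rw [getD_aStep, ← hsdef]
    simp only [if_true]
    by_cases h : day ∈ d.getD s [] <;> simp [PySem.Set.add, PySem.Set.contains, h]
  have hlenB : (PySem.Set.add seen (s, day)).length = seen.length + (if (s, day) ∈ seen then 0 else 1) := by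
    by_cases h : (s, day) ∈ seen <;> simp [PySem.Set.add, PySem.Set.contains, h]
  have hcond : ((s, day) ∈ seen) ↔ day ∈ d.getD s [] := hmem s day
  have hsum' : (d.keys.map (fun k => (d.getD k []).length)).sum = seen.length := by
    rw [PySem.Dict.values_eq_map_keys d hnd [], List.map_map] at hsum
    exact hsum
  have hgoal : ((aStep day d ci).keys.map (fun k => ((aStep day d ci).getD k []).length)).sum
      = (PySem.Set.add seen (s, day)).length → (((aStep day d ci).values).map List.length).sum
      = (PySem.Set.add seen (s, day)).length := by
    rw [PySem.Dict.values_eq_map_keys _ hnd' [], List.map_map]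
    exact id
  refine hgoal ?_
  rw [hkeys, hlenB]
  by_cases hc : d.contains s
  · have hsmem : s ∈ d.keys := by rw [← PySem.Dict.contains_iff_mem_keys]; exact hc
    have key := sum_map_update d.keys s (fun k => (d.getD k []).length)
      (fun k => ((aStep day d ci).getD k []).length) hnd hsmem
      (fun x _ hxs => by
        show ((aStep day d ci).getD x []).length = (d.getD x []).length
        rw [getD_aStep, ← hsdef]; simp [hxs])
    simp only [] at key
    simp only [hc, if_true]
    by_cases h : day ∈ d.getD s []
    · have h2 : (s, day) ∈ seen := hcond.mpr h
      rw [if_pos h] at hlenA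
      rw [if_pos h2]
      omega
    · have h2 : (s, day) ∉ seen := fun hh => h (hcond.mp hh)
      rw [if_neg h] at hlenA
      rw [if_neg h2]
      omega
  · have hcf : d.contains s = false := by simpa using hc
    have hns : s ∉ d.keys := by
      intro h; rw [← PySem.Dict.contains_iff_mem_keys] at h; simp [hcf] at h
    have h0 : d.getD s ([] : PySem.Set Int) = [] :=
      PySem.Dict.getD_of_not_contains d [] hcf
    have hsame : d.keys.map (fun k => ((aStep day d ci).getD k []).length)
        = d.keys.map (fun k => (d.getD k []).length) :=
      List.map_congr_left (fun x hx => by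
        show ((aStep day d ci).getD x []).length = (d.getD x []).length
        rw [getD_aStep, ← hsdef]; simp [show x ≠ s from fun h => hns (h ▸ hx)])
    have hnotin : (s, day) ∉ seen := fun h => by
      have := hcond.mp h; rw [h0] at this; cases this
    simp only [hc, if_false, Bool.false_eq_true, List.map_append, List.sum_append,
      List.map_cons, List.map_nil, List.sum_cons, List.sum_nil, hsame]
    rw [hlenA, h0]
    simp [hnotin, hsum']

lemma inv_inner (day : Int) (ds : List (List String)) (d : PySem.Dict String (PySem.Set Int))
    (seen : PySem.Set (String × Int)) (h : SInv d seen) :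
    SInv (ds.foldl (aStep day) d)
      (ds.foldl (fun seen ci => PySem.Set.add seen (PySem.List.pyGetD ci 0 "", day)) seen) := by
  induction ds generalizing d seen with
  | nil => exact h
  | cons c t ih => exact ih _ _ (inv_aStep day d seen c h)

lemma inv_outer (l : List (Int × List (List String))) (d : PySem.Dict String (PySem.Set Int))
    (seen : PySem.Set (String × Int)) (h : SInv d seen) :
    SInv (l.foldl (fun d p => p.2.foldl (aStep p.1) d) d)
      (l.foldl (fun seen p => p.2.foldl
        (fun seen ci => PySem.Set.add seen (PySem.List.pyGetD ci 0 "", p.1)) seen) seen) := by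
  induction l generalizing d seen with
  | nil => exact h
  | cons p t ih => exact ih _ _ (inv_inner p.1 p.2 d seen h)

lemma sinv_empty : SInv PySem.Dict.empty (PySem.Set.empty : PySem.Set (String × Int)) := by
  refine ⟨?_, ?_, ?_⟩
  · simp [pysem]
  · intro s day; simp [pysem, PySem.Set.empty]
  · simp [pysem, PySem.Set.empty, PySem.Dict.values, PySem.Dict.empty]

-- Within one day i, the flat (subject, i) fold grows exactly like a local subject set, provided membership of (·, i) in seen matches L.
lemma inner_count (i : Int) (ds : List (List String)) :
    ∀ (seen : PySem.Set (String × Int)) (L : PySem.Set String),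
    (∀ s : String, (s, i) ∈ seen ↔ s ∈ L) →
    (ds.foldl (fun seen ci => PySem.Set.add seen (PySem.List.pyGetD ci 0 "", i)) seen).length + L.length
      = seen.length + (ds.foldl (fun st ci => PySem.Set.add st (PySem.List.pyGetD ci 0 "")) L).length
    ∧ (∀ p ∈ ds.foldl (fun seen ci => PySem.Set.add seen (PySem.List.pyGetD ci 0 "", i)) seen, p ∈ seen ∨ p.2 = i) := by
  induction ds with
  | nil => intro seen L _; exact ⟨rfl, fun p hp => Or.inl hp⟩
  | cons c t ih =>
    intro seen L hiff
    set sj := PySem.List.pyGetD c 0 "" with hsj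
    have hiff' : ∀ s : String, (s, i) ∈ PySem.Set.add seen (sj, i) ↔ s ∈ PySem.Set.add L sj := by
      intro s
      simp only [PySem.Set.mem_add, hiff s, Prod.mk.injEq]
      tauto
    obtain ⟨hlen, hmem⟩ := ih (PySem.Set.add seen (sj, i)) (PySem.Set.add L sj) hiff'
    have hl1 : (PySem.Set.add seen (sj, i)).length = seen.length + (if (sj, i) ∈ seen then 0 else 1) := by
      by_cases h : (sj, i) ∈ seen <;> simp [PySem.Set.add, PySem.Set.contains, h]
    have hl2 : (PySem.Set.add L sj).length = L.length + (if sj ∈ L then 0 else 1) := by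
      by_cases h : sj ∈ L <;> simp [PySem.Set.add, PySem.Set.contains, h]
    have hc : ((sj, i) ∈ seen) ↔ sj ∈ L := hiff sj
    constructor
    · simp only [List.foldl_cons, ← hsj]
      by_cases h : sj ∈ L
      · rw [if_pos (hc.mpr h)] at hl1; rw [if_pos h] at hl2; omega
      · rw [if_neg (fun hh => h (hc.mp hh))] at hl1; rw [if_neg h] at hl2; omega
    · intro p hp
      simp only [List.foldl_cons, ← hsj] at hp
      rcases hmem p hp with h | h
      · rcases (PySem.Set.mem_add _ _ _).mp h with h' | h'
        · exact Or.inl h'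
        · exact Or.inr (by rw [h'])
      · exact Or.inr h

-- Across days: the flat-pair set's size is the sum of the per-day local set sizes.
lemma outer_count : ∀ (schedule : List (List (List String))) (i : Int) (seen : PySem.Set (String × Int)),
    (∀ p ∈ seen, p.2 < i) →
    ((PySem.List.enumerate schedule i).foldl (fun seen p => p.2.foldl
        (fun seen ci => PySem.Set.add seen (PySem.List.pyGetD ci 0 "", p.1)) seen) seen).length
      = seen.length + (schedule.map (fun ds =>
          (ds.foldl (fun st ci => PySem.Set.add st (PySem.List.pyGetD ci 0 "")) (PySem.Set.empty : PySem.Set String)).length)).sum := by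
  intro schedule
  induction schedule with
  | nil => intro i seen _; simp [PySem.List.enumerate_nil]
  | cons ds t ih =>
    intro i seen hlt
    rw [PySem.List.enumerate_cons]
    simp only [List.foldl_cons, List.map_cons, List.sum_cons]
    have hiff : ∀ s : String, (s, i) ∈ seen ↔ s ∈ (PySem.Set.empty : PySem.Set String) := by
      intro s
      simp only [PySem.Set.empty]
      constructor
      · intro h; exact absurd (hlt _ h) (by simp)
      · intro h; cases h
    obtain ⟨hlen, hmem⟩ := inner_count i ds seen PySem.Set.empty hiff
    have hlt' : ∀ p ∈ ds.foldl (fun seen ci => PySem.Set.add seen (PySem.List.pyGetD ci 0 "", i)) seen, p.2 < i + 1 := by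
      intro p hp
      rcases hmem p hp with h | h
      · exact lt_trans (hlt p h) (by omega)
      · omega
    rw [ih (i + 1) _ hlt']
    simp only [PySem.Set.empty, List.length_nil] at hlen ⊢
    omega

lemma sum_len_cast {α : Type} (l : List (PySem.Set α)) :
    (l.map PySem.Set.len).sum = ((l.map List.length).sum : Int) := by
  induction l with
  | nil => simp
  | cons a t ih => simp [PySem.Set.len, ih]

-- ===== VERDICT (by name: the statement is the Claim_ definition above) =====
theorem count_subject_days_spec : Claim_equal_count_subject_days := by
  intro schedule _ _
  unfold Spec_count_subject_days count_subject_days count_subject_days_alt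
  obtain ⟨-, -, hsum⟩ := inv_outer (PySem.List.enumerate schedule 0)
    PySem.Dict.empty PySem.Set.empty sinv_empty
  simp only []
  rw [PySem.List.foldl_add, PySem.List.foldl_add]
  rw [sum_len_cast, hsum]
  rw [outer_count schedule 0 PySem.Set.empty (by intro p hp; cases hp)]
  push_cast
  simp [PySem.Set.len, PySem.Set.empty]
  rfl
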